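-- pv_equiv track=rewrite | github.com/Qiankunyi/intro_speech_understanding | lec03/homework3.py | cancellation
-- ===== SOURCE A (Python) =====
-- def cancellation(input_list, stop_word):
--
--     output_list = []
--     for item in input_list:
--         if item == stop_word:
--             break
--         else:
--             output_list.append(item)
--     return output_list
-- ===== SOURCE B (Python) =====
-- def cancellation(input_list, stop_word):
--     try:
--         idx = input_list.index(stop_word)
--     except ValueError:
--         return list(input_list)
--     return list(input_list[:idx])
-- ===== Notes on version B (the rewrite author's own statement) =====
-- stated objective: idiomatic
-- what changed: Replaces A's element-by-element accumulate-with-break loop by a locate-then-slice decomposition: list.index finds the boundary (ValueError means no stop word) and one slice copies the prefix.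
import Mathlib
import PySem

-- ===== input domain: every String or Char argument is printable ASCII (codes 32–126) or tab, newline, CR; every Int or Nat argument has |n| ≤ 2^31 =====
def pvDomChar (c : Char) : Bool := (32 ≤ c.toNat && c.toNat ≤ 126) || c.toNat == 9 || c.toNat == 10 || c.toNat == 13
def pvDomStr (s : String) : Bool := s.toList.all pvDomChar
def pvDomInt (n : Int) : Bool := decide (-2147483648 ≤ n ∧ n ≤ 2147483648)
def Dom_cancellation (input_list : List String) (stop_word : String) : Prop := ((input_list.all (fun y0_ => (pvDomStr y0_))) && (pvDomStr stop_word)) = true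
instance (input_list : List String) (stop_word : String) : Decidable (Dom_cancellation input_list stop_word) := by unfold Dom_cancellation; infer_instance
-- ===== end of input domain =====

-- B replaces the accumulate-with-break loop by locate-the-boundary-then-slice (idiomatic decomposition).


-- ===== PORT A =====
-- A: accumulate items until the stop word is hit (break); ported as structural recursion.
def cancellation (input_list : List String) (stop_word : String) : List String :=
  match input_list with
  | [] => []
  | item :: rest =>
      if item = stop_word then []
      else item :: cancellation rest stop_word

-- ===== PORT B =====
-- B: locate the stop word with list.index (ValueError -> whole list), then slice the prefix.
def cancellation_alt (input_list : List String) (stop_word : String) : List String :=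
  match PySem.List.index? input_list stop_word with
  | none => input_list
  | some idx => PySem.List.slice input_list none (some (idx : Int))

-- ===== PRECONDITION & SPEC =====
def Spec_cancellation (input_list : List String) (stop_word : String) (out : List String) : Prop := out = cancellation_alt input_list stop_word
instance (input_list : List String) (stop_word : String) (out : List String) : Decidable (Spec_cancellation input_list stop_word out) := by unfold Spec_cancellation; infer_instance

-- ===== CLAIM (what is proved, stated in full; the proofs are below) =====
def Claim_equal_cancellation : Prop := ∀ (input_list : List String) (stop_word : String), Dom_cancellation input_list stop_word → Spec_cancellation input_list stop_word (cancellation input_list stop_word)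

-- ===== LEMMAS AND PROOFS =====

-- ===== VERDICT (by name: the statement is the Claim_ definition above) =====
theorem cancellation_eq_alt (input_list : List String) (stop_word : String) :
    cancellation input_list stop_word = cancellation_alt input_list stop_word := by
  induction input_list with
  | nil => rfl
  | cons x xs ih =>
      by_cases hx : x = stop_word
      · subst hx
        rw [cancellation_alt, PySem.List.index?_cons_self]
        show cancellation (x :: xs) x = PySem.List.slice (x :: xs) none (some ((0:Nat):Int))
        rw [PySem.List.slice_to_natCast]
        simp [cancellation]
      · rw [cancellation_alt, PySem.List.index?_cons_of_ne xs hx]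
        rw [cancellation, if_neg hx, ih, cancellation_alt]
        cases h : PySem.List.index? xs stop_word with
        | none => simp
        | some i =>
            simp only [Option.map_some]
            rw [PySem.List.slice_to_natCast, PySem.List.slice_to_natCast]
            simp

theorem cancellation_spec : Claim_equal_cancellation := by
  intro input_list stop_word _
  unfold Spec_cancellation
  exact cancellation_eq_alt input_list stop_word
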